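-- pv_equiv track=rewrite | github.com/redfast00/brandmeister-dmr-sea | src/decode72to49.py | golay2312
-- ===== SOURCE A (Python) =====
-- def golay2312(cw):
--     POLY = 0xAE3                #/* or use the other polynomial, 0xC75 */
--     cw = cw & 0xfff             # Strip off check bits and only use data
--     c = cw                      #/* save original codeword */
--     for i in range(1,13):       #/* examine each data bit */
--         if (cw & 1):            #/* test data bit */
--             cw = cw ^ POLY      #/* XOR polynomial */
--         cw = cw >> 1            #/* shift intermediate result */
--     return((cw << 12) | c)      #/* assemble codeword */
-- ===== SOURCE B (Python) =====
-- # Direct generator-matrix linear combination: XOR fixed parity rows for each set data bit.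
-- _GOLAY_ROWS = [0x2e3, 0x5c6, 0x16f, 0x2de, 0x5bc, 0x19b, 0x336, 0x66c, 0x63b, 0x695, 0x7c9, 0x571]
--
-- def golay2312(cw):
--     c = cw & 0xfff
--     p = 0
--     for i, row in enumerate(_GOLAY_ROWS):
--         if (c >> i) & 1:
--             p ^= row
--     return (p << 12) | c
-- ===== Notes on version B (the rewrite author's own statement) =====
-- stated objective: alternative
-- what changed: Replaces the LFSR-style twelve-step shift/XOR remainder loop with a direct linear combination: twelve hardcoded generator-matrix parity rows are XOR-ed together for each set data bit.
import Mathlib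
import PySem

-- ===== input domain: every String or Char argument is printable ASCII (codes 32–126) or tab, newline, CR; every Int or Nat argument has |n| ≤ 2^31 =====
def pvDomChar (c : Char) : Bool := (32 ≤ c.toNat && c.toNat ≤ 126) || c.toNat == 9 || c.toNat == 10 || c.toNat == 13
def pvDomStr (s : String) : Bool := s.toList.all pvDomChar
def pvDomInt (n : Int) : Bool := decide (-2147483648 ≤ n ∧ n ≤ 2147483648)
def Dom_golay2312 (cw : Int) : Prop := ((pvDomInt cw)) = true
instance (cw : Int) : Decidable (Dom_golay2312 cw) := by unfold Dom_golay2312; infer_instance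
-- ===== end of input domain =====

-- B replaces the twelve-step shift/XOR division loop by XOR-ing twelve hardcoded generator-matrix parity rows (alternative algorithm, same cost).


-- ===== PORT A =====
def golay2312 (cw : Int) : Int :=
  let cw := PySem.Int.band cw 0xfff
  let c := cw
  let cw := (PySem.List.pyRange 1 13 1).foldl
    (fun cw _ =>
      (if PySem.Int.band cw 1 ≠ 0 then PySem.Int.bxor cw 0xAE3 else cw) >>> (1 : Nat)) cw
  PySem.Int.bor (cw <<< (12 : Nat)) c

-- ===== PORT B =====
def golayRows : List Int :=
  [0x2e3, 0x5c6, 0x16f, 0x2de, 0x5bc, 0x19b, 0x336, 0x66c, 0x63b, 0x695, 0x7c9, 0x571]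

def golay2312_alt (cw : Int) : Int :=
  let c := PySem.Int.band cw 0xfff
  let p := (PySem.List.enumerate golayRows).foldl
    (fun p ir => if PySem.Int.band (c >>> ir.1) 1 ≠ 0 then PySem.Int.bxor p ir.2 else p) 0
  PySem.Int.bor (p <<< (12 : Nat)) c

-- ===== PRECONDITION & SPEC =====
def Spec_golay2312 (cw : Int) (out : Int) : Prop := out = golay2312_alt cw
instance (cw : Int) (out : Int) : Decidable (Spec_golay2312 cw out) := by unfold Spec_golay2312; infer_instance

-- ===== CLAIM (what is proved, stated in full; the proofs are below) =====
def Claim_equal_golay2312 : Prop := ∀ (cw : Int), Dom_golay2312 cw → Spec_golay2312 cw (golay2312 cw)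

-- ===== LEMMAS AND PROOFS =====
-- Loop bodies applied to the already-masked 12-bit value m (proof-only restatements of the ports).
def golayA (m : Int) : Int :=
  PySem.Int.bor
    (((PySem.List.pyRange 1 13 1).foldl
      (fun cw _ =>
        (if PySem.Int.band cw 1 ≠ 0 then PySem.Int.bxor cw 0xAE3 else cw) >>> (1 : Nat)) m) <<< (12 : Nat)) m

def golayB (m : Int) : Int :=
  PySem.Int.bor
    (((PySem.List.enumerate golayRows).foldl
      (fun p ir => if PySem.Int.band (m >>> ir.1) 1 ≠ 0 then PySem.Int.bxor p ir.2 else p) 0) <<< (12 : Nat)) m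

theorem golayA_eq (cw : Int) : golay2312 cw = golayA (PySem.Int.band cw 0xfff) := rfl

theorem golayB_eq (cw : Int) : golay2312_alt cw = golayB (PySem.Int.band cw 0xfff) := rfl

theorem band_mask_bounds (a : Int) :
    0 ≤ PySem.Int.band a 4095 ∧ PySem.Int.band a 4095 < 4096 := by
  unfold PySem.Int.band
  by_cases h : 0 ≤ a
  · have h1 : a.toNat &&& (4095 : Int).toNat ≤ (4095 : Int).toNat := Nat.and_le_right
    simp only [h, (by norm_num : (0:Int) ≤ 4095), if_pos]
    constructor
    · exact_mod_cast Nat.zero_le _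
    · exact_mod_cast Nat.lt_succ_of_le h1
  · simp only [h, if_false, (by norm_num : (0:Int) ≤ 4095), if_pos]
    have h2 : (4095 : Int).toNat - ((4095 : Int).toNat &&& (-a - 1).toNat) ≤ (4095 : Int).toNat :=
      Nat.sub_le _ _
    constructor
    · exact_mod_cast Nat.zero_le _
    · exact_mod_cast Nat.lt_succ_of_le h2

def checkAll : Nat → Bool
  | 0 => true
  | n+1 => (golayA n == golayB n) && checkAll n

set_option maxHeartbeats 4000000 in
set_option maxRecDepth 10000 in
theorem key_bool : checkAll 4096 = true := by decide

theorem golay_key : ∀ k : Fin 4096, golayA (k : Int) = golayB (k : Int) := by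
  have h : ∀ n : Nat, checkAll n = true → ∀ k < n, golayA k = golayB k := by
    intro n
    induction n with
    | zero => intro _ k hk; omega
    | succ m ih =>
      intro h k hk
      simp only [checkAll, Bool.and_eq_true, beq_iff_eq] at h
      rcases Nat.lt_succ_iff_lt_or_eq.mp hk with h' | h'
      · exact ih h.2 k h'
      · subst h'; exact h.1
  intro k
  exact h 4096 key_bool k k.isLt

-- ===== VERDICT (by name: the statement is the Claim_ definition above) =====
theorem golay2312_spec : Claim_equal_golay2312 := by
  intro cw _
  unfold Spec_golay2312
  rw [golayA_eq, golayB_eq]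
  obtain ⟨h0, h1⟩ := band_mask_bounds cw
  have hm : PySem.Int.band cw 0xfff = ((PySem.Int.band cw 4095).toNat : Int) := by omega
  rw [hm]
  have hk : (PySem.Int.band cw 4095).toNat < 4096 := by omega
  exact golay_key ⟨(PySem.Int.band cw 4095).toNat, hk⟩
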